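-- pv_equiv track=rewrite | github.com/kiyan-rezaee/Design-Algorithms-1400-2 | greedy_and_dp.py | dp
-- ===== SOURCE A (Python) =====
-- def dp(n, m, p):
--     dp = [[0 for _ in range(n)] for _ in range(m)]
--     dp[0][0] = p[0]
--     for i in range(m):
--         for j in range(n):
--             if i == 0 and j == 0:
--                 pass
--             elif i == 0:
--                 dp[i][j] = dp[i][j - 1] + sum(p[:j + 1])
--             elif i > j:
--                 dp[i][j] = dp[i - 1][j]
--             elif i == j:
--                 dp[i][j] = dp[i][j - 1] + p[i]
--             elif i == 1:
--                 dp[i][j] = dp[i - 1][j] - dp[i][j - 1]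
--             else:
--                 dp[i][j] = dp[i][j - 1] + (dp[i][j - i - 1] -
--                                            dp[i][j - i - 2]) + p[j]
--     return dp[-1][-1]
-- ===== SOURCE B (Python) =====
-- def dp(n, m, p):
--     # Rolling two-row DP with prefix sums of p: O(m*n) time, O(n) memory,
--     # instead of A's full m*n table with an O(n) sum(p[:j+1]) recomputed per column.
--     pref = [0]
--     for x in p:
--         pref.append(pref[-1] + x)
--
--     def psum(j):  # == sum(p[:j+1]) (Python slice clamps past the end)
--         return pref[min(j + 1, len(p))]
--
--     row = [0] * n
--     row[0] = p[0]
--     for j in range(1, n):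
--         row[j] = row[j - 1] + psum(j)
--     for i in range(1, m):
--         prev, row = row, [0] * n
--         for j in range(n):
--             if i > j:
--                 row[j] = prev[j]
--             elif i == j:
--                 row[j] = row[j - 1] + p[i]
--             elif i == 1:
--                 row[j] = prev[j] - row[j - 1]
--             else:
--                 low = row[j - i - 2] if j - i - 2 >= 0 else 0
--                 row[j] = row[j - 1] + (row[j - i - 1] - low) + p[j]
--     return row[-1]
-- ===== Notes on version B (the rewrite author's own statement) =====
-- stated objective: faster
-- what changed: B keeps only a rolling pair of rows instead of the full m*n table and replaces the per-column sum(p[:j+1]) recomputation in row 0 by a precomputed prefix-sum array, making row 0 O(n) instead of O(n^2).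
import Mathlib
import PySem

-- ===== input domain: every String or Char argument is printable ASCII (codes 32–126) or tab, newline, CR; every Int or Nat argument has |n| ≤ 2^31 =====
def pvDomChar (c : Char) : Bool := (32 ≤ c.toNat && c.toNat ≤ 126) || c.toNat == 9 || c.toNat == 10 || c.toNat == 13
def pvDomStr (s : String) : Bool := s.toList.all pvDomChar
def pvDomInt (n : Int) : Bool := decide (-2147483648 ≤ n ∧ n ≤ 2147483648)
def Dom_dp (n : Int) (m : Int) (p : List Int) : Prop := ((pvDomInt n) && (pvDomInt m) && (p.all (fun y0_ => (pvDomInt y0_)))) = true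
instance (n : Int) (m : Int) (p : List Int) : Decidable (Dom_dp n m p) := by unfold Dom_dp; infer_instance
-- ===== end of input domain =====

-- B replaces A's full m×n table and per-column sum(p[:j+1]) by a rolling two-row DP
-- over precomputed prefix sums (return value only; neither program mutates its arguments).

-- ===== PORT A =====
-- A-side helpers: dp[i][j] read / write on the table (indices in range under Pre_dp;
-- negative -1 wraps, as in Python)
def tGet (t : List (List Int)) (i j : Int) : Int :=
  PySem.List.pyGetD (PySem.List.pyGetD t i []) j 0

def tSet (t : List (List Int)) (i j : Int) (v : Int) : List (List Int) :=
  PySem.List.pySetD t i (PySem.List.pySetD (PySem.List.pyGetD t i []) j v)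

-- one assignment dp[i][j] = … of A's inner loop, branch for branch
def dpAStep (p : List Int) (i : Int) (t : List (List Int)) (j : Int) : List (List Int) :=
  if i = 0 ∧ j = 0 then t
  else if i = 0 then tSet t i j (tGet t i (j-1) + (PySem.List.slice p none (some (j+1))).sum)
  else if i > j then tSet t i j (tGet t (i-1) j)
  else if i = j then tSet t i j (tGet t i (j-1) + PySem.List.pyGetD p i 0)
  else if i = 1 then tSet t i j (tGet t (i-1) j - tGet t i (j-1))
  else tSet t i j (tGet t i (j-1) + (tGet t i (j-i-1) - tGet t i (j-i-2)) + PySem.List.pyGetD p j 0)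

def dp (n : Int) (m : Int) (p : List Int) : Int :=
  let t0 : List (List Int) :=
    (PySem.List.pyRange 0 m 1).map (fun _ => (PySem.List.pyRange 0 n 1).map (fun _ => (0:Int)))
  let t1 := tSet t0 0 0 (PySem.List.pyGetD p 0 0)      -- dp[0][0] = p[0]
  let t2 := (PySem.List.pyRange 0 m 1).foldl (fun t i =>
              (PySem.List.pyRange 0 n 1).foldl (fun t j => dpAStep p i t j) t) t1
  PySem.List.pyGetD (PySem.List.pyGetD t2 (-1) []) (-1) 0   -- dp[-1][-1]

-- ===== PORT B =====
-- pref = [0]; for x in p: pref.append(pref[-1] + x)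
def dpBPref (p : List Int) : List Int :=
  p.foldl (fun pr x => pr ++ [PySem.List.pyGetD pr (-1) 0 + x]) [(0:Int)]

-- row[j] = row[j-1] + psum(j)  with psum(j) = pref[min(j+1, len(p))]
def dpBRow0Step (pref : List Int) (plen : Int) (r : List Int) (j : Int) : List Int :=
  PySem.List.pySetD r j (PySem.List.pyGetD r (j-1) 0 + PySem.List.pyGetD pref (min (j+1) plen) 0)

-- one assignment row[j] = … of B's inner loop over a row i ≥ 1
def dpBRowStep (p : List Int) (i : Int) (prev r : List Int) (j : Int) : List Int :=
  if i > j then PySem.List.pySetD r j (PySem.List.pyGetD prev j 0)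
  else if i = j then PySem.List.pySetD r j (PySem.List.pyGetD r (j-1) 0 + PySem.List.pyGetD p i 0)
  else if i = 1 then PySem.List.pySetD r j (PySem.List.pyGetD prev j 0 - PySem.List.pyGetD r (j-1) 0)
  else
    let low := if 0 ≤ j - i - 2 then PySem.List.pyGetD r (j-i-2) 0 else 0
    PySem.List.pySetD r j (PySem.List.pyGetD r (j-1) 0 + (PySem.List.pyGetD r (j-i-1) 0 - low) + PySem.List.pyGetD p j 0)

-- prev, row = row, [0]*n; inner loop over j
def dpBRow (p : List Int) (n : Int) (prev : List Int) (i : Int) : List Int :=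
  (PySem.List.pyRange 0 n 1).foldl (dpBRowStep p i prev) (List.replicate n.toNat 0)

def dp_alt (n : Int) (m : Int) (p : List Int) : Int :=
  let pref := dpBPref p
  let row0 := PySem.List.pySetD (List.replicate n.toNat (0:Int)) 0 (PySem.List.pyGetD p 0 0)
  let row1 := (PySem.List.pyRange 1 n 1).foldl (dpBRow0Step pref (p.length : Int)) row0
  let row2 := (PySem.List.pyRange 1 m 1).foldl (dpBRow p n) row1
  PySem.List.pyGetD row2 (-1) 0

-- ===== PRECONDITION & SPEC =====
-- Pre_dp = exactly the inputs where the Python A returns: otherwise dp[-1][-1], p[0],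
-- p[i] (branch i == j, needs min(m,n) entries) or p[j] (else branch, reached iff
-- m ≥ 3 ∧ n ≥ 4, needs n entries) raises IndexError.
def Pre_dp (n : Int) (m : Int) (p : List Int) : Prop :=
  1 ≤ n ∧ 1 ≤ m ∧ (if 3 ≤ m ∧ 4 ≤ n then n else min m n) ≤ (p.length : Int)
instance (n : Int) (m : Int) (p : List Int) : Decidable (Pre_dp n m p) := by unfold Pre_dp; infer_instance

def pvWitness_dp : Int × Int × List Int := (2, 2, [3, -1])

def Spec_dp (n : Int) (m : Int) (p : List Int) (out : Int) : Prop := out = dp_alt n m p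
instance (n : Int) (m : Int) (p : List Int) (out : Int) : Decidable (Spec_dp n m p out) := by unfold Spec_dp; infer_instance

-- ===== CLAIM (what is proved, stated in full; the proofs are below) =====
def Claim_equal_dp : Prop := ∀ (n : Int) (m : Int) (p : List Int), Dom_dp n m p → Pre_dp n m p → Spec_dp n m p (dp n m p)

-- ===== LEMMAS AND PROOFS =====

-- indexing / setting at the length of a prefix
theorem pvGetD_append_cons {α : Type} (front : List α) (x : α) (rest : List α) (d : α) :
    PySem.List.pyGetD (front ++ x :: rest) (front.length : Int) d = x := by
  rw [PySem.List.pyGetD_natCast]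
  simp [List.getD_eq_getElem?_getD]

theorem pvSetD_append_cons {α : Type} (front : List α) (x y : α) (rest : List α) :
    PySem.List.pySetD (front ++ x :: rest) (front.length : Int) y = front ++ y :: rest := by
  rw [PySem.List.pySetD_natCast]
  rw [List.set_append_right _ _ (le_refl _)]
  simp

theorem pvSetD_pad (w : List Int) (k : Nat) (v : Int) :
    PySem.List.pySetD (w ++ List.replicate (k+1) (0:Int)) (w.length : Int) v
      = w ++ v :: List.replicate k 0 := by
  have : List.replicate (k+1) (0:Int) = 0 :: List.replicate k 0 := rfl
  rw [this, pvSetD_append_cons]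

theorem pvGetD_neg_one_pad (w : List Int) (k : Nat) :
    PySem.List.pyGetD (w ++ List.replicate (k+1) (0:Int)) (-1) 0 = 0 := by
  have : List.replicate (k+1) (0:Int) = List.replicate k 0 ++ [0] := by
    simp [List.replicate_succ' ]
  rw [this, ← List.append_assoc, PySem.List.pyGetD_neg_one_append_singleton]

-- prefix sums: dpBPref computes the scan of partial sums
def scanSum : Int → List Int → List Int
  | s, [] => [s]
  | s, x :: xs => s :: scanSum (s + x) xs

theorem pref_fold (xs : List Int) : ∀ (acc : List Int) (s : Int),
    xs.foldl (fun pr x => pr ++ [PySem.List.pyGetD pr (-1) 0 + x]) (acc ++ [s])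
      = acc ++ scanSum s xs := by
  induction xs with
  | nil => intro acc s; simp [scanSum]
  | cons x xs ih =>
    intro acc s
    simp only [List.foldl_cons, PySem.List.pyGetD_neg_one_append_singleton]
    rw [ih (acc ++ [s]) (s + x)]
    simp [scanSum]

theorem dpBPref_eq (p : List Int) : dpBPref p = scanSum 0 p := by
  have h := pref_fold p [] 0
  simpa [dpBPref] using h

theorem scanSum_getD (xs : List Int) : ∀ (k : Nat) (s : Int), k ≤ xs.length →
    (scanSum s xs).getD k 0 = s + (xs.take k).sum := by
  induction xs with
  | nil =>
    intro k s hk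
    have hk0 : k = 0 := by simpa using hk
    subst hk0; simp [scanSum]
  | cons x xs ih =>
    intro k s hk
    cases k with
    | zero => simp [scanSum]
    | succ k =>
      simp only [scanSum, List.getD_cons_succ, List.take_succ_cons, List.sum_cons]
      rw [ih k (s + x) (by simpa using hk)]
      ring

theorem take_min_len (p : List Int) (a : Nat) : p.take (min a p.length) = p.take a := by
  rcases le_total a p.length with h | h
  · rw [min_eq_left h]
  · rw [min_eq_right h, List.take_length, List.take_of_length_le h]

theorem psum_eq (p : List Int) (j' : Nat) :
    PySem.List.pyGetD (dpBPref p) (min ((j':Int)+1) (p.length:Int)) 0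
      = (PySem.List.slice p none (some ((j':Int)+1))).sum := by
  have h1 : ((j':Int)+1) = ((j'+1 : Nat) : Int) := by push_cast; ring
  rw [h1, PySem.List.slice_to_natCast]
  have h2 : min ((j'+1:Nat):Int) ((p.length:Nat):Int) = ((min (j'+1) p.length : Nat) : Int) := by
    simp [Nat.cast_min]
  rw [h2, PySem.List.pyGetD_natCast, dpBPref_eq,
      scanSum_getD _ _ _ (by omega : min (j'+1) p.length ≤ p.length), take_min_len]
  simp

theorem tGet_shape (front : List (List Int)) (r : List Int) (rest : List (List Int)) (j : Int) :
    tGet (front ++ r :: rest) (front.length : Int) j = PySem.List.pyGetD r j 0 := by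
  unfold tGet; rw [pvGetD_append_cons]

theorem tSet_shape (front : List (List Int)) (r : List Int) (rest : List (List Int)) (j : Int) (v : Int) :
    tSet (front ++ r :: rest) (front.length : Int) j v
      = front ++ (PySem.List.pySetD r j v) :: rest := by
  unfold tSet; rw [pvGetD_append_cons, pvSetD_append_cons]

theorem step0_sync (p : List Int) (rest : List (List Int)) (j' k : Nat) (w : List Int)
    (_hw : w.length = j') (hj : 1 ≤ j') :
    dpAStep p 0 ((w ++ List.replicate (k+1) (0:Int)) :: rest) (j':Int)
      = (dpBRow0Step (dpBPref p) (p.length:Int) (w ++ List.replicate (k+1) 0) (j':Int)) :: rest := by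
  have hj0 : ¬((0:Int) = 0 ∧ (j':Int) = 0) := by
    rintro ⟨-, h⟩; omega
  have hS0 : ∀ (j v : Int), tSet ((w ++ List.replicate (k+1) (0:Int)) :: rest) 0 j v
      = (PySem.List.pySetD (w ++ List.replicate (k+1) 0) j v) :: rest := by
    intro j v
    simpa using tSet_shape ([] : List (List Int)) (w ++ List.replicate (k+1) 0) rest j v
  have hG0 : ∀ (j : Int), tGet ((w ++ List.replicate (k+1) (0:Int)) :: rest) 0 j
      = PySem.List.pyGetD (w ++ List.replicate (k+1) 0) j 0 := by
    intro j
    simpa using tGet_shape ([] : List (List Int)) (w ++ List.replicate (k+1) 0) rest j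
  unfold dpAStep dpBRow0Step
  rw [if_neg hj0, if_pos rfl, hS0, hG0, psum_eq]

theorem step_sync (p prev : List Int) (front rest : List (List Int)) (i' j' k : Nat) (w : List Int)
    (hi : 1 ≤ i') (hfront : front.length + 1 = i') (_hw : w.length = j') :
    dpAStep p (i':Int) (front ++ prev :: (w ++ List.replicate (k+1) (0:Int)) :: rest) (j':Int)
      = front ++ prev :: (dpBRowStep p (i':Int) prev (w ++ List.replicate (k+1) 0) (j':Int)) :: rest := by
  set r := w ++ List.replicate (k+1) (0:Int) with hr
  have hL : ((front ++ [prev]).length : Int) = (i':Int) := by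
    simp only [List.length_append, List.length_cons, List.length_nil]; omega
  have ht : front ++ prev :: r :: rest = (front ++ [prev]) ++ r :: rest := by simp
  have hGr : ∀ j, tGet (front ++ prev :: r :: rest) (i':Int) j = PySem.List.pyGetD r j 0 := by
    intro j; rw [ht, ← hL, tGet_shape]
  have hGp : ∀ j, tGet (front ++ prev :: r :: rest) ((i':Int)-1) j = PySem.List.pyGetD prev j 0 := by
    intro j
    have h : ((i':Int)-1) = (front.length : Int) := by omega
    rw [h, tGet_shape]
  have hS : ∀ j v, tSet (front ++ prev :: r :: rest) (i':Int) j v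
      = front ++ prev :: (PySem.List.pySetD r j v) :: rest := by
    intro j v; rw [ht, ← hL, tSet_shape]; simp
  have hi0 : ¬((i':Int) = 0) := by omega
  have hi00 : ¬((i':Int) = 0 ∧ (j':Int) = 0) := fun h => hi0 h.1
  unfold dpAStep dpBRowStep
  rw [if_neg hi00, if_neg hi0]
  by_cases h1 : (i':Int) > (j':Int)
  · rw [if_pos h1, if_pos h1, hGp, hS]
  · rw [if_neg h1, if_neg h1]
    by_cases h2 : (i':Int) = (j':Int)
    · rw [if_pos h2, if_pos h2, hGr, hS]
    · rw [if_neg h2, if_neg h2]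
      by_cases h3 : (i':Int) = 1
      · rw [if_pos h3, if_pos h3, hGr, hGp, hS]
      · rw [if_neg h3, if_neg h3, hGr, hGr, hGr, hS]
        by_cases h4 : (0:Int) ≤ (j':Int) - i' - 2
        · simp only [if_pos h4]
        · have h5 : (j':Int) - i' - 2 = -1 := by omega
          simp only [h5, hr, pvGetD_neg_one_pad]
          norm_num

theorem pvSetD_pad' (w : List Int) (k : Nat) (v : Int) :
    PySem.List.pySetD (w ++ List.replicate (k+1) (0:Int)) (w.length : Int) v
      = (w ++ [v]) ++ List.replicate k 0 := by
  rw [pvSetD_pad]; simp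

theorem step0B_shape (pref : List Int) (plen : Int) (w : List Int) (k : Nat) :
    ∃ v, dpBRow0Step pref plen (w ++ List.replicate (k+1) (0:Int)) (w.length:Int)
      = (w ++ [v]) ++ List.replicate k 0 := by
  unfold dpBRow0Step
  exact ⟨_, pvSetD_pad' _ _ _⟩

theorem stepB_shape (p : List Int) (i : Int) (prev w : List Int) (k : Nat) :
    ∃ v, dpBRowStep p i prev (w ++ List.replicate (k+1) (0:Int)) (w.length:Int)
      = (w ++ [v]) ++ List.replicate k 0 := by
  unfold dpBRowStep
  split_ifs with h1 h2 h3
  all_goals exact ⟨_, pvSetD_pad' _ _ _⟩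

theorem inner0_sync (p : List Int) (rest : List (List Int)) :
    ∀ (k j' : Nat) (w : List Int) (N : Int), w.length = j' → 1 ≤ j' → N = (j':Int) + k →
    (PySem.List.pyRange (j':Int) N 1).foldl (fun t j => dpAStep p 0 t j)
        ((w ++ List.replicate k 0) :: rest)
      = ((PySem.List.pyRange (j':Int) N 1).foldl (dpBRow0Step (dpBPref p) (p.length:Int))
          (w ++ List.replicate k 0)) :: rest := by
  intro k
  induction k with
  | zero =>
    intro j' w N _ hj hN
    rw [PySem.List.pyRange_one_eq_nil (by omega)]
    simp
  | succ k ih =>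
    intro j' w N hw hj hN
    rw [PySem.List.pyRange_one_cons (by omega : (j':Int) < N)]
    simp only [List.foldl_cons]
    rw [step0_sync p rest j' k w hw hj]
    obtain ⟨v, hv⟩ := step0B_shape (dpBPref p) (p.length:Int) w k
    rw [hw] at hv
    rw [hv]
    have h := ih (j'+1) (w ++ [v]) N (by simp [hw]) (by omega) (by push_cast; push_cast at hN; omega)
    push_cast at h
    exact h

theorem inner_sync (p prev : List Int) (front rest : List (List Int)) (i' : Nat)
    (hi : 1 ≤ i') (hfront : front.length + 1 = i') :
    ∀ (k j' : Nat) (w : List Int) (N : Int), w.length = j' → N = (j':Int) + k →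
    (PySem.List.pyRange (j':Int) N 1).foldl (fun t j => dpAStep p (i':Int) t j)
        (front ++ prev :: (w ++ List.replicate k 0) :: rest)
      = front ++ prev :: ((PySem.List.pyRange (j':Int) N 1).foldl (dpBRowStep p (i':Int) prev)
          (w ++ List.replicate k 0)) :: rest := by
  intro k
  induction k with
  | zero =>
    intro j' w N _ hN
    rw [PySem.List.pyRange_one_eq_nil (by omega)]
    simp
  | succ k ih =>
    intro j' w N hw hN
    rw [PySem.List.pyRange_one_cons (by omega : (j':Int) < N)]
    simp only [List.foldl_cons]
    rw [step_sync p prev front rest i' j' k w hi hfront hw]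
    obtain ⟨v, hv⟩ := stepB_shape p (i':Int) prev w k
    rw [hw] at hv
    rw [hv]
    have h := ih (j'+1) (w ++ [v]) N (by simp [hw]) (by push_cast; push_cast at hN; omega)
    push_cast at h
    exact h

theorem outer_sync (p : List Int) (n' : Nat) :
    ∀ (k i' : Nat) (front : List (List Int)) (prev : List Int) (M : Int),
    front.length + 1 = i' → M = (i':Int) + k →
    ∃ front',
    (PySem.List.pyRange (i':Int) M 1).foldl
        (fun t i => (PySem.List.pyRange 0 ((n':Nat):Int) 1).foldl (fun t j => dpAStep p i t j) t)
        (front ++ prev :: List.replicate k (List.replicate n' (0:Int)))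
      = front' ++ [(PySem.List.pyRange (i':Int) M 1).foldl (dpBRow p ((n':Nat):Int)) prev] := by
  intro k
  induction k with
  | zero =>
    intro i' front prev M hf hM
    rw [PySem.List.pyRange_one_eq_nil (show M ≤ (i':Int) by omega)]
    exact ⟨front, by simp⟩
  | succ k ih =>
    intro i' front prev M hf hM
    push_cast at hM
    rw [PySem.List.pyRange_one_cons (by omega : (i':Int) < M)]
    simp only [List.foldl_cons]
    rw [show List.replicate (k+1) (List.replicate n' (0:Int))
          = List.replicate n' (0:Int) :: List.replicate k (List.replicate n' 0) from rfl]
    have hinner := inner_sync p prev front (List.replicate k (List.replicate n' 0)) i'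
        (by omega) hf n' 0 [] ((n':Nat):Int) rfl (by push_cast; ring)
    push_cast at hinner
    simp only [List.nil_append] at hinner
    rw [hinner]
    have hrow : (PySem.List.pyRange 0 ((n':Nat):Int) 1).foldl (dpBRowStep p (i':Int) prev)
        (List.replicate n' 0) = dpBRow p ((n':Nat):Int) prev (i':Int) := by
      unfold dpBRow; rw [Int.toNat_natCast]
    rw [hrow]
    have h := ih (i'+1) (front ++ [prev]) (dpBRow p ((n':Nat):Int) prev (i':Int)) M
        (by simp; omega) (by push_cast; omega)
    push_cast at h
    obtain ⟨front', hfr⟩ := h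
    refine ⟨front', ?_⟩
    rw [show front ++ prev :: dpBRow p ((n':Nat):Int) prev (i':Int) :: List.replicate k (List.replicate n' 0)
          = (front ++ [prev]) ++ dpBRow p ((n':Nat):Int) prev (i':Int) :: List.replicate k (List.replicate n' 0) by simp]
    exact hfr

theorem map_const_pyRange {α : Type} (k : Nat) (c : α) :
    (PySem.List.pyRange 0 (k:Int) 1).map (fun _ => c) = List.replicate k c := by
  have hlen : (PySem.List.pyRange 0 (k:Int) 1).length = k := by
    rw [PySem.List.length_pyRange_one]; simp
  rw [List.map_const', hlen]

theorem dp_main (n'' m'' : Nat) (p : List Int) :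
    dp ((n''+1:Nat):Int) ((m''+1:Nat):Int) p = dp_alt ((n''+1:Nat):Int) ((m''+1:Nat):Int) p := by
  simp only [dp, dp_alt]
  have hzrow : List.map (fun _ => (0:Int)) (PySem.List.pyRange 0 ((n''+1:Nat):Int) 1)
      = List.replicate (n''+1) 0 := map_const_pyRange _ _
  have ht0 : List.map (fun _ => List.map (fun _ => (0:Int)) (PySem.List.pyRange 0 ((n''+1:Nat):Int) 1))
        (PySem.List.pyRange 0 ((m''+1:Nat):Int) 1)
      = List.replicate (m''+1) (List.replicate (n''+1) 0) := by
    rw [hzrow, map_const_pyRange]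
  rw [ht0]
  have hpad0 := pvSetD_pad ([]:List Int) n'' (PySem.List.pyGetD p 0 0)
  simp only [List.length_nil, Nat.cast_zero, List.nil_append] at hpad0
  have ht1 : tSet (List.replicate (m''+1) (List.replicate (n''+1) (0:Int))) 0 0 (PySem.List.pyGetD p 0 0)
      = (PySem.List.pyGetD p 0 0 :: List.replicate n'' 0) :: List.replicate m'' (List.replicate (n''+1) 0) := by
    have h2 := tSet_shape ([]:List (List Int)) (List.replicate (n''+1) (0:Int))
        (List.replicate m'' (List.replicate (n''+1) 0)) 0 (PySem.List.pyGetD p 0 0)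
    simp only [List.length_nil, Nat.cast_zero, List.nil_append] at h2
    rw [List.replicate_succ, h2, hpad0]
  rw [ht1]
  have hin0 := inner0_sync p (List.replicate m'' (List.replicate (n''+1) 0)) n'' 1
      [PySem.List.pyGetD p 0 0] ((n''+1:Nat):Int) rfl (le_refl 1) (by push_cast; ring)
  simp only [Nat.cast_one, List.singleton_append] at hin0
  have hstep0 : dpAStep p 0 ((PySem.List.pyGetD p 0 0 :: List.replicate n'' 0)
        :: List.replicate m'' (List.replicate (n''+1) 0)) 0
      = (PySem.List.pyGetD p 0 0 :: List.replicate n'' 0)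
        :: List.replicate m'' (List.replicate (n''+1) 0) := by
    unfold dpAStep; simp
  have hfirst : List.foldl (fun t j => dpAStep p 0 t j)
        ((PySem.List.pyGetD p 0 0 :: List.replicate n'' 0)
          :: List.replicate m'' (List.replicate (n''+1) 0))
        (PySem.List.pyRange 0 ((n''+1:Nat):Int) 1)
      = (List.foldl (dpBRow0Step (dpBPref p) (p.length:Int))
          (PySem.List.pyGetD p 0 0 :: List.replicate n'' 0)
          (PySem.List.pyRange 1 ((n''+1:Nat):Int) 1))
        :: List.replicate m'' (List.replicate (n''+1) 0) := by
    rw [PySem.List.pyRange_one_cons (show (0:Int) < ((n''+1:Nat):Int) by push_cast; omega)]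
    simp only [List.foldl_cons, zero_add]
    rw [hstep0, hin0]
  rw [PySem.List.pyRange_one_cons (show (0:Int) < ((m''+1:Nat):Int) by push_cast; omega)]
  simp only [List.foldl_cons, zero_add]
  rw [hfirst]
  have hrow0 : PySem.List.pySetD (List.replicate (((n''+1:Nat):Int)).toNat (0:Int)) 0 (PySem.List.pyGetD p 0 0)
      = PySem.List.pyGetD p 0 0 :: List.replicate n'' 0 := by
    rw [Int.toNat_natCast]
    exact hpad0
  rw [hrow0]
  obtain ⟨front', hout⟩ := outer_sync p (n''+1) m'' 1 []
      (List.foldl (dpBRow0Step (dpBPref p) (p.length:Int))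
        (PySem.List.pyGetD p 0 0 :: List.replicate n'' 0) (PySem.List.pyRange 1 ((n''+1:Nat):Int) 1))
      ((m''+1:Nat):Int) (by simp) (by push_cast; ring)
  simp only [Nat.cast_one, List.nil_append] at hout
  rw [hout, PySem.List.pyGetD_neg_one_append_singleton]

-- ===== VERDICT (by name: the statement is the Claim_ definition above) =====
theorem dp_spec : Claim_equal_dp := by
  intro n m p _ hpre
  obtain ⟨hn, hm, -⟩ := hpre
  unfold Spec_dp
  obtain ⟨n', rfl⟩ : ∃ k : Nat, n = (k:Int) := ⟨n.toNat, by omega⟩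
  obtain ⟨m', rfl⟩ : ∃ k : Nat, m = (k:Int) := ⟨m.toNat, by omega⟩
  obtain ⟨n'', rfl⟩ : ∃ t, n' = t+1 := ⟨n'-1, by omega⟩
  obtain ⟨m'', rfl⟩ : ∃ t, m' = t+1 := ⟨m'-1, by omega⟩
  exact dp_main n'' m'' p
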